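-- pv_equiv track=rewrite | github.com/ygorg/JCDL_2020_KPE_Eval | evaluation/util.py | compute_rel
-- ===== SOURCE A (Python) =====
-- def compute_rel(candidate, reference):
--     """Computes matches between candidate and reference.
--
--     Keyphrases may have variants thus the List[List[str]] construct.
--     :param candidate: List of candidate keyphrases.
--     :type candidate: List[List[str]]
--     :param reference: List of reference keyphrases.
--     :type reference: List[List[str]]
--     :returns: A list of len(candidate) lists containing the ids of matched
--               references.
--     :rtype: List[List[int]]
--     """
--     rel = []
--     for k in candidate:
--         # rel_k contains the references matching by candidate at rank k
--         # This is a list because there can be multiple occurence of the same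
--         # reference (after stemming for ex)
--         rel_k = []
--
--         # For each reference check whether its variants intersect
--         # with candidate at rank K variants
--
--         for j, gold_variants in enumerate(reference):
--             if set(gold_variants).intersection(k):
--                 rel_k.append(j)
--         rel.append(rel_k)
--     return rel
-- ===== SOURCE B (Python) =====
-- def compute_rel(candidate, reference):
--     # Inverted index: variant string -> list of reference ids containing it.
--     index = {}
--     for j, gold_variants in enumerate(reference):
--         for v in gold_variants:
--             index.setdefault(v, []).append(j)
--     rel = []
--     for k in candidate:
--         matched = set()
--         for v in k:
--             matched.update(index.get(v, ()))
--         rel.append(sorted(matched))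
--     return rel
-- ===== Notes on version B (the rewrite author's own statement) =====
-- stated objective: alternative
-- what changed: Replaces the per-candidate scan over all references (a set intersection per candidate-reference pair) by an inverted index from variant string to reference ids built once; each candidate then unions the id lists of its own variants and sorts the result.
import Mathlib
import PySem

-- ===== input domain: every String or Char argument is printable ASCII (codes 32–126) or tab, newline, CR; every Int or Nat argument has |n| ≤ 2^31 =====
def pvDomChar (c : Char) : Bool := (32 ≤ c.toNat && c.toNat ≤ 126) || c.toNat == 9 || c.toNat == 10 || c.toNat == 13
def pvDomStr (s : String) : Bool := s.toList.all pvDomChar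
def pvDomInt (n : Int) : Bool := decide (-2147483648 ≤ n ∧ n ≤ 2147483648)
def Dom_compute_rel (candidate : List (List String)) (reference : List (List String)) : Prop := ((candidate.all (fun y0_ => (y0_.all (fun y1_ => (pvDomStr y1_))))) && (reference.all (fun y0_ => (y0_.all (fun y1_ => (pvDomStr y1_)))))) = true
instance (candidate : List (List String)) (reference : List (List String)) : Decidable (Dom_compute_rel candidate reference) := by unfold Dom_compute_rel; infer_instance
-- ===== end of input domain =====

-- B replaces A's per-candidate scan over all references by an inverted index
-- (variant string -> reference ids) built once; per candidate it unions the id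
-- lists of its own variants and sorts them (objective: alternative).


-- ===== PORT A =====
-- for k in candidate: for j, gold in enumerate(reference): if set(gold).intersection(k): rel_k.append(j)
def compute_rel (candidate : List (List String)) (reference : List (List String)) : List (List Int) :=
  candidate.foldl (fun rel k =>
    rel ++ [(PySem.List.enumerate reference 0).foldl (fun rel_k p =>
      if (PySem.Set.ofList p.2).inter k ≠ [] then rel_k ++ [p.1] else rel_k) []]) []

-- ===== PORT B =====
-- index.setdefault(v, []).append(j)  =  d.modify v [] (· ++ [j])
def compute_rel_alt (candidate : List (List String)) (reference : List (List String)) : List (List Int) :=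
  let index : PySem.Dict String (List Int) :=
    (PySem.List.enumerate reference 0).foldl (fun d p =>
      p.2.foldl (fun d v => d.modify v [] (fun l => l ++ [p.1])) d) PySem.Dict.empty
  candidate.foldl (fun rel k =>
    rel ++ [PySem.List.sorted (k.foldl (fun m v => PySem.Set.update m (index.getD v []))
      PySem.Set.empty) (fun x => x)]) []

-- ===== PRECONDITION & SPEC =====
def Spec_compute_rel (candidate : List (List String)) (reference : List (List String)) (out : List (List Int)) : Prop := out = compute_rel_alt candidate reference
instance (candidate : List (List String)) (reference : List (List String)) (out : List (List Int)) : Decidable (Spec_compute_rel candidate reference out) := by unfold Spec_compute_rel; infer_instance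

-- ===== CLAIM (what is proved, stated in full; the proofs are below) =====
def Claim_equal_compute_rel : Prop := ∀ (candidate : List (List String)) (reference : List (List String)), Dom_compute_rel candidate reference → Spec_compute_rel candidate reference (compute_rel candidate reference)

-- ===== LEMMAS AND PROOFS =====

theorem enum_lb {α : Type} (l : List α) (s : Int) :
    ∀ p ∈ PySem.List.enumerate l s, s ≤ p.1 := by
  induction l generalizing s with
  | nil => simp [PySem.List.enumerate]
  | cons x t ih =>
    intro p hp
    rw [PySem.List.enumerate_cons, List.mem_cons] at hp
    rcases hp with rfl | hp
    · simp
    · have := ih (s + 1) p hp; omega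

theorem enum_pairwise {α : Type} (l : List α) (s : Int) :
    List.Pairwise (fun a b => a.1 < b.1) (PySem.List.enumerate l s) := by
  induction l generalizing s with
  | nil => simp [PySem.List.enumerate]
  | cons x t ih =>
    rw [PySem.List.enumerate_cons]
    refine List.Pairwise.cons ?_ (ih (s + 1))
    intro p hp
    have := enum_lb t (s + 1) p hp
    simpa using by omega

theorem mem_fold_update (k : List String) (g : String → List Int) (s : PySem.Set Int) (x : Int) :
    x ∈ k.foldl (fun m v => PySem.Set.update m (g v)) s ↔ x ∈ s ∨ ∃ v ∈ k, x ∈ g v := by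
  induction k generalizing s with
  | nil => simp
  | cons v t ih =>
    simp only [List.foldl_cons, ih, PySem.Set.mem_update, List.mem_cons]
    constructor
    · rintro ((h | h) | ⟨w, hw, hx⟩)
      · exact Or.inl h
      · exact Or.inr ⟨v, Or.inl rfl, h⟩
      · exact Or.inr ⟨w, Or.inr hw, hx⟩
    · rintro (h | ⟨w, (rfl | hw), hx⟩)
      · exact Or.inl (Or.inl h)
      · exact Or.inl (Or.inr hx)
      · exact Or.inr ⟨w, hw, hx⟩

theorem nodup_fold_update (k : List String) (g : String → List Int) (s : PySem.Set Int)
    (h : s.Nodup) : (k.foldl (fun m v => PySem.Set.update m (g v)) s).Nodup := by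
  induction k generalizing s with
  | nil => exact h
  | cons v t ih => exact ih _ (PySem.Set.nodup_update s (g v) h)

-- the nested index-building loop, flattened to a single loop over (variant, id) pairs
theorem index_flatten (l : List (Int × List String)) (d : PySem.Dict String (List Int)) :
    l.foldl (fun d p => p.2.foldl (fun d v => d.modify v [] (fun l => l ++ [p.1])) d) d
      = (l.flatMap (fun p => p.2.map (fun v => (v, p.1)))).foldl
          (fun d q => d.modify q.1 [] (fun l => l ++ [q.2])) d := by
  induction l generalizing d with
  | nil => rfl
  | cons p t ih => simp [List.foldl_append, ih, List.foldl_map]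

theorem mem_index_getD (reference : List (List String)) (v : String) (x : Int) :
    x ∈ ((PySem.List.enumerate reference 0).foldl (fun d p =>
        p.2.foldl (fun d v => d.modify v [] (fun l => l ++ [p.1])) d)
        PySem.Dict.empty).getD v []
      ↔ ∃ p ∈ PySem.List.enumerate reference 0, v ∈ p.2 ∧ x = p.1 := by
  rw [index_flatten, PySem.Dict.getD_foldl_modify_append]
  simp only [PySem.Dict.getD_empty, List.nil_append, List.mem_map, List.mem_filter,
    List.mem_flatMap, beq_iff_eq]
  constructor
  · rintro ⟨q, ⟨⟨p, hp, ⟨w, hw, rfl⟩⟩, hqv⟩, rfl⟩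
    exact ⟨p, hp, hqv ▸ hw, rfl⟩
  · rintro ⟨p, hp, hv, rfl⟩
    exact ⟨(v, p.1), ⟨⟨p, hp, ⟨v, hv, rfl⟩⟩, rfl⟩, rfl⟩

-- per-candidate: B's sorted union of index hits equals A's scan over the references
theorem per_candidate (reference : List (List String)) (k : List String) :
    PySem.List.sorted (k.foldl (fun m v => PySem.Set.update m
        (((PySem.List.enumerate reference 0).foldl (fun d p =>
          p.2.foldl (fun d v => d.modify v [] (fun l => l ++ [p.1])) d)
          PySem.Dict.empty).getD v [])) PySem.Set.empty) (fun x => x)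
      = (PySem.List.enumerate reference 0).foldl (fun rel_k p =>
          if (PySem.Set.ofList p.2).inter k ≠ [] then rel_k ++ [p.1] else rel_k) [] := by
  have hA : (PySem.List.enumerate reference 0).foldl (fun rel_k p =>
      if (PySem.Set.ofList p.2).inter k ≠ [] then rel_k ++ [p.1] else rel_k) []
      = ((PySem.List.enumerate reference 0).filter
          (fun p => decide ((PySem.Set.ofList p.2).inter k ≠ []))).map (fun p => p.1) := by
    simpa using PySem.List.foldl_append_ite
      (fun p : Int × List String => (PySem.Set.ofList p.2).inter k ≠ [])
      (fun p : Int × List String => p.1) (PySem.List.enumerate reference 0) []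
  rw [hA]
  have hpw : List.Pairwise (fun a b => a < b) (((PySem.List.enumerate reference 0).filter
      (fun p => decide ((PySem.Set.ofList p.2).inter k ≠ []))).map (fun p => p.1)) := by
    rw [List.pairwise_map]
    exact List.Pairwise.filter _ (enum_pairwise reference 0)
  apply PySem.List.sorted_eq_of_perm_of_pairwise_lt
  · -- permutation: both sides are Nodup with the same members
    rw [List.perm_ext_iff_of_nodup]
    · intro x
      simp only [List.mem_map, List.mem_filter, decide_eq_true_eq, mem_fold_update,
        mem_index_getD, PySem.Set.empty]
      constructor
      · rintro ⟨p, ⟨hp, hne⟩, rfl⟩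
        rcases List.exists_mem_of_ne_nil _ hne with ⟨w, hw⟩
        rw [PySem.Set.mem_inter, PySem.Set.mem_ofList] at hw
        exact Or.inr ⟨w, hw.2, p, hp, hw.1, rfl⟩
      · rintro (h | ⟨w, hw, p, hp, hv, rfl⟩)
        · exact absurd h (by simp)
        · refine ⟨p, ⟨hp, ?_⟩, rfl⟩
          intro hnil
          have : w ∈ (PySem.Set.ofList p.2).inter k := by
            rw [PySem.Set.mem_inter, PySem.Set.mem_ofList]; exact ⟨hv, hw⟩
          simp [hnil] at this
    · -- the filtered-enumerate side is Nodup (indices strictly increase)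
      exact hpw.imp ne_of_lt
    · exact nodup_fold_update _ _ _ List.nodup_nil
  · -- the filtered-enumerate side is strictly increasing
    exact hpw

-- ===== VERDICT (by name: the statement is the Claim_ definition above) =====
theorem compute_rel_spec : Claim_equal_compute_rel := by
  intro candidate reference _
  unfold Spec_compute_rel compute_rel compute_rel_alt
  simp only [PySem.List.foldl_append_singleton_eq_map, List.nil_append]
  exact List.map_congr_left (fun k _ => (per_candidate reference k).symm)
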